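-- pv_equiv track=rewrite | github.com/gisinnovationmy/Q2G-QGIStoGeoServerConnector | Version/0.9.2/convert_se_to_sld_1_0.py | _rename_se_elements
-- ===== SOURCE A (Python) =====
-- def _rename_se_elements(content):
--     """Task 3: Convert SE-prefixed elements to SLD-prefixed."""
--     se_to_sld_map = [
--         ('se:FeatureTypeStyle', 'sld:FeatureTypeStyle'),
--         ('se:Rule', 'sld:Rule'),
--         ('se:PointSymbolizer', 'sld:PointSymbolizer'),
--         ('se:LineSymbolizer', 'sld:LineSymbolizer'),
--         ('se:PolygonSymbolizer', 'sld:PolygonSymbolizer'),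
--         ('se:RasterSymbolizer', 'sld:RasterSymbolizer'),
--         ('se:TextSymbolizer', 'sld:TextSymbolizer'),
--         ('se:Fill', 'sld:Fill'),
--         ('se:Stroke', 'sld:Stroke'),
--         ('se:Graphic', 'sld:Graphic'),
--         ('se:Mark', 'sld:Mark'),
--         ('se:ExternalGraphic', 'sld:ExternalGraphic'),
--         ('se:Font', 'sld:Font'),
--         ('se:Halo', 'sld:Halo'),
--         ('se:LabelPlacement', 'sld:LabelPlacement'),
--         ('se:PointPlacement', 'sld:PointPlacement'),
--         ('se:LinePlacement', 'sld:LinePlacement'),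
--     ]
--
--     for se_tag, sld_tag in se_to_sld_map:
--         # Replace opening tags (with and without attributes)
--         content = content.replace(f'<{se_tag}>', f'<{sld_tag}>')
--         content = content.replace(f'<{se_tag} ', f'<{sld_tag} ')
--         # Replace closing tags
--         content = content.replace(f'</{se_tag}>', f'</{sld_tag}>')
--
--     return content
-- ===== SOURCE B (Python) =====
-- def _rename_se_elements(content):
--     """Single left-to-right scan: at each potential tag start try the 51 patterns once,
--     instead of 51 full replace passes over the whole string."""
--     tags = ['FeatureTypeStyle', 'Rule', 'PointSymbolizer', 'LineSymbolizer',
--             'PolygonSymbolizer', 'RasterSymbolizer', 'TextSymbolizer', 'Fill',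
--             'Stroke', 'Graphic', 'Mark', 'ExternalGraphic', 'Font', 'Halo',
--             'LabelPlacement', 'PointPlacement', 'LinePlacement']
--     pairs = []
--     for t in tags:
--         pairs.append(('<se:' + t + '>', '<sld:' + t + '>'))
--         pairs.append(('<se:' + t + ' ', '<sld:' + t + ' '))
--         pairs.append(('</se:' + t + '>', '</sld:' + t + '>'))
--     out = []
--     i = 0
--     n = len(content)
--     while i < n:
--         hit = None
--         if content[i] == '<':
--             for pat, repl in pairs:
--                 if content.startswith(pat, i):
--                     hit = (pat, repl)
--                     break
--         if hit is None:
--             out.append(content[i])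
--             i += 1
--         else:
--             out.append(hit[1])
--             i += len(hit[0])
--     return ''.join(out)
-- ===== Notes on version B (the rewrite author's own statement) =====
-- stated objective: alternative
-- what changed: A makes 51 sequential full-string .replace passes (three per tag); B builds the 51 (pattern, replacement) pairs once and rewrites the string in a single left-to-right scan that tries the patterns only at positions where a tag could open.
import Mathlib
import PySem

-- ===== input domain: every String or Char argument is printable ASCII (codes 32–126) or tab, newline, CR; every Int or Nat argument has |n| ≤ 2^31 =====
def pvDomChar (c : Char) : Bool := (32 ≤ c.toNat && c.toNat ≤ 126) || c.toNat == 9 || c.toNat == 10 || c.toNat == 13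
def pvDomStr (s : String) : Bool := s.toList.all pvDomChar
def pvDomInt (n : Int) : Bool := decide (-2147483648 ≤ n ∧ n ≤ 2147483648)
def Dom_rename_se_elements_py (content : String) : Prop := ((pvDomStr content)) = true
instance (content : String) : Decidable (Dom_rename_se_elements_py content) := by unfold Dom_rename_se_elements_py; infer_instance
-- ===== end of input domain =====

-- B replaces A's 51 sequential full-string `.replace` passes by ONE left-to-right scan that
-- tries the 51 tag patterns at each position where a tag could open; same return value
-- (objective: alternative algorithm, not claimed faster).

-- ===== PORT A =====
def seToSldMap : List (String × String) :=
  [("se:FeatureTypeStyle", "sld:FeatureTypeStyle"),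
   ("se:Rule", "sld:Rule"),
   ("se:PointSymbolizer", "sld:PointSymbolizer"),
   ("se:LineSymbolizer", "sld:LineSymbolizer"),
   ("se:PolygonSymbolizer", "sld:PolygonSymbolizer"),
   ("se:RasterSymbolizer", "sld:RasterSymbolizer"),
   ("se:TextSymbolizer", "sld:TextSymbolizer"),
   ("se:Fill", "sld:Fill"),
   ("se:Stroke", "sld:Stroke"),
   ("se:Graphic", "sld:Graphic"),
   ("se:Mark", "sld:Mark"),
   ("se:ExternalGraphic", "sld:ExternalGraphic"),
   ("se:Font", "sld:Font"),
   ("se:Halo", "sld:Halo"),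
   ("se:LabelPlacement", "sld:LabelPlacement"),
   ("se:PointPlacement", "sld:PointPlacement"),
   ("se:LinePlacement", "sld:LinePlacement")]

def rename_se_elements_py (content : String) : String :=
  seToSldMap.foldl (fun c p =>
    let c1 := PySem.Str.replace c ("<" ++ p.1 ++ ">") ("<" ++ p.2 ++ ">")
    let c2 := PySem.Str.replace c1 ("<" ++ p.1 ++ " ") ("<" ++ p.2 ++ " ")
    PySem.Str.replace c2 ("</" ++ p.1 ++ ">") ("</" ++ p.2 ++ ">")) content

-- ===== PORT B =====
def tagsB : List String :=
  ["FeatureTypeStyle", "Rule", "PointSymbolizer", "LineSymbolizer",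
   "PolygonSymbolizer", "RasterSymbolizer", "TextSymbolizer", "Fill",
   "Stroke", "Graphic", "Mark", "ExternalGraphic", "Font", "Halo",
   "LabelPlacement", "PointPlacement", "LinePlacement"]

def pairsB : List (List Char × List Char) :=
  tagsB.flatMap (fun t =>
    [(("<se:" ++ t ++ ">").toList, ("<sld:" ++ t ++ ">").toList),
     (("<se:" ++ t ++ " ").toList, ("<sld:" ++ t ++ " ").toList),
     (("</se:" ++ t ++ ">").toList, ("</sld:" ++ t ++ ">").toList)])

-- Source B's while-loop as structural recursion: at each position, if the char opens a tag,
-- try the 51 (pattern, replacement) pairs in order (find? = the for/break).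
def scanB : List Char → List Char
  | [] => []
  | c :: t =>
    if c = '<' then
      match pairsB.find? (fun pr => pr.1.isPrefixOf (c :: t)) with
      | some pr => pr.2 ++ scanB (List.drop (pr.1.length - 1) t)
      | none => c :: scanB t
    else c :: scanB t
termination_by cs => cs.length
decreasing_by
  · simp only [List.length_drop, List.length_cons]; omega
  · simp
  · simp

def rename_se_elements_py_alt (content : String) : String :=
  String.ofList (scanB content.toList)

-- ===== PRECONDITION & SPEC =====
def Spec_rename_se_elements_py (content : String) (out : String) : Prop := out = rename_se_elements_py_alt content
instance (content : String) (out : String) : Decidable (Spec_rename_se_elements_py content out) := by unfold Spec_rename_se_elements_py; infer_instance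

-- ===== CLAIM (what is proved, stated in full; the proofs are below) =====
def Claim_equal_rename_se_elements_py : Prop := ∀ (content : String), Dom_rename_se_elements_py content → Spec_rename_se_elements_py content (rename_se_elements_py content)

-- ===== LEMMAS AND PROOFS =====

-- Clean structural form of Python's str.replace for a nonempty pattern.
def repC (p r : List Char) : List Char → List Char
  | [] => []
  | c :: t =>
    if p.isPrefixOf (c :: t) then r ++ repC p r (List.drop (p.length - 1) t)
    else c :: repC p r t
termination_by cs => cs.length
decreasing_by
  · simp only [List.length_drop, List.length_cons]; omega
  · simp

def stepP (c : List Char) (pr : List Char × List Char) : List Char := repC pr.1 pr.2 c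

def GoodPair (pr : List Char × List Char) : Prop :=
  pr.1.head? = some '<' ∧ pr.2.head? = some '<' ∧
  (∀ a ∈ pr.1.tail, a ≠ '<') ∧ (∀ a ∈ pr.2.tail, a ≠ '<')

def goodPairB (pr : List Char × List Char) : Bool :=
  pr.1.head? == some '<' && pr.2.head? == some '<' &&
  pr.1.tail.all (fun a => a != '<') && pr.2.tail.all (fun a => a != '<')

def noprefB (pr qr : List Char × List Char) : Bool :=
  (pr.1 == qr.1 || !(pr.1.isPrefixOf qr.1)) && !(pr.1.isPrefixOf qr.2) && !(qr.2.isPrefixOf pr.1)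

lemma pairsB_goodB : pairsB.all goodPairB = true := by decide

lemma pairsB_noprefB : (pairsB.all fun pr => pairsB.all fun qr => noprefB pr qr) = true := by
  decide

lemma isPrefixOf_false_iff (u v : List Char) :
    u.isPrefixOf v = false ↔ ¬ u <+: v := by
  rw [Bool.eq_false_iff]
  constructor
  · intro h hh; exact h (List.isPrefixOf_iff_prefix.mpr hh)
  · intro h hh; exact h (List.isPrefixOf_iff_prefix.mp hh)

lemma pairsB_good (pr : List Char × List Char) (hpr : pr ∈ pairsB) : GoodPair pr := by
  have h := List.all_eq_true.mp pairsB_goodB pr hpr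
  unfold goodPairB at h
  simp only [Bool.and_eq_true, beq_iff_eq, List.all_eq_true, bne_iff_ne] at h
  exact ⟨h.1.1.1, h.1.1.2, h.1.2, h.2⟩

lemma pairsB_nopref (pr qr : List Char × List Char) (hp : pr ∈ pairsB) (hq : qr ∈ pairsB) :
    (pr.1 ≠ qr.1 → ¬ pr.1 <+: qr.1) ∧ ¬ pr.1 <+: qr.2 ∧ ¬ qr.2 <+: pr.1 := by
  have h := List.all_eq_true.mp (List.all_eq_true.mp pairsB_noprefB pr hp) qr hq
  unfold noprefB at h
  simp only [Bool.and_eq_true, Bool.or_eq_true, beq_iff_eq, Bool.not_eq_eq_eq_not,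
    Bool.not_true, isPrefixOf_false_iff] at h
  refine ⟨fun hne => ?_, h.1.2, h.2⟩
  rcases h.1.1 with heq | hnp
  · exact absurd heq hne
  · exact hnp

lemma repC_nil (p r : List Char) : repC p r [] = [] := by simp [repC]

lemma repC_cons_pos (p r : List Char) (c : Char) (t : List Char) (h : p <+: c :: t) :
    repC p r (c :: t) = r ++ repC p r (List.drop (p.length - 1) t) := by
  rw [repC]
  simp [List.isPrefixOf_iff_prefix.mpr h]

lemma repC_cons_neg (p r : List Char) (c : Char) (t : List Char) (h : ¬ p <+: c :: t) :
    repC p r (c :: t) = c :: repC p r t := by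
  have hf : p.isPrefixOf (c :: t) = false := by
    rw [Bool.eq_false_iff]
    intro hh
    exact h (List.isPrefixOf_iff_prefix.mp hh)
  rw [repC]
  simp [hf]

lemma go_eq (p r : List Char) (hp : p ≠ []) :
    ∀ (fuel : Nat) (l acc : List Char), l.length ≤ fuel →
      PySem.Chars.replace.go p r fuel l acc = acc.reverse ++ repC p r l := by
  intro fuel
  induction fuel with
  | zero =>
    intro l acc hl
    have hnil : l = [] := List.eq_nil_of_length_eq_zero (Nat.le_zero.mp hl)
    subst hnil
    rw [PySem.Chars.replace.go, repC_nil]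
  | succ n ih =>
    intro l acc hl
    match l with
    | [] =>
      rw [PySem.Chars.replace.go, repC_nil]
      · simp
      · omega
    | c :: t =>
      obtain ⟨k, hk⟩ := Nat.exists_eq_succ_of_ne_zero
        (fun h0 => hp (List.eq_nil_of_length_eq_zero h0))
      by_cases hpre : p.isPrefixOf (c :: t) = true
      · rw [PySem.Chars.replace.go]
        simp only [hpre, if_true]
        rw [ih _ _ (by simp only [List.length_drop, List.length_cons] at *; omega)]
        rw [repC_cons_pos p r c t (List.isPrefixOf_iff_prefix.mp hpre)]
        have hdrop : List.drop p.length (c :: t) = List.drop (p.length - 1) t := by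
          rw [hk]; simp
        rw [hdrop]
        simp
      · rw [PySem.Chars.replace.go]
        simp only [hpre, if_false, Bool.false_eq_true]
        rw [ih t (c :: acc) (by simp at hl; omega)]
        rw [repC_cons_neg p r c t (fun hh => hpre (List.isPrefixOf_iff_prefix.mpr hh))]
        simp

lemma replace_eq_repC (p r s : List Char) (hp : p ≠ []) :
    PySem.Chars.replace s p r = repC p r s := by
  rw [PySem.Chars.replace]
  have : p.isEmpty = false := by
    cases p
    · exact absurd rfl hp
    · rfl
  rw [this]
  simp only [Bool.false_eq_true, if_false]
  rw [go_eq p r hp s.length s [] (Nat.le_refl _)]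
  simp

lemma not_prefix_append (u w x : List Char) (h1 : ¬ u <+: w) (h2 : ¬ w <+: u) :
    ¬ u <+: w ++ x := by
  intro h
  by_cases hle : u.length ≤ w.length
  · exact h1 (List.prefix_of_prefix_length_le h (List.prefix_append w x) hle)
  · exact h2 (List.prefix_of_prefix_length_le (List.prefix_append w x) h (Nat.le_of_not_le hle))

lemma prefix_head (q : List Char) (a : Char) (y : List Char)
    (hq : q.head? = some '<') (h : q <+: a :: y) : a = '<' ∧ q.tail <+: y := by
  cases q with
  | nil => simp at hq
  | cons b q' =>
    have hb : b = '<' := by simpa using hq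
    obtain ⟨z, hz⟩ := h
    rw [List.cons_append] at hz
    injection hz with h1 h2
    exact ⟨h1 ▸ hb, ⟨z, h2⟩⟩

lemma repC_append_no_lt (p r w x : List Char) (hW : ∀ a ∈ w, a ≠ '<')
    (hp : p.head? = some '<') : repC p r (w ++ x) = w ++ repC p r x := by
  induction w with
  | nil => simp
  | cons a w' ih =>
    have hnp : ¬ p <+: a :: (w' ++ x) := by
      intro h
      exact hW a (List.mem_cons_self) (prefix_head p a (w' ++ x) hp h).1
    rw [List.cons_append, repC_cons_neg p r a (w' ++ x) hnp,
      ih (fun b hb => hW b (List.mem_cons_of_mem a hb))]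
    rfl

lemma repC_absorb (p r w x : List Char) (hw : ∀ a ∈ w.tail, a ≠ '<') (hne : w ≠ [])
    (hp : p.head? = some '<') (h1 : ¬ p <+: w) (h2 : ¬ w <+: p) :
    repC p r (w ++ x) = w ++ repC p r x := by
  cases w with
  | nil => exact absurd rfl hne
  | cons a w' =>
    have hnp : ¬ p <+: a :: (w' ++ x) := by
      have := not_prefix_append p (a :: w') x h1 h2
      simpa using this
    rw [List.cons_append, repC_cons_neg p r a (w' ++ x) hnp,
      repC_append_no_lt p r w' x (by simpa using hw) hp]
    rfl

lemma repC_self (p r x : List Char) (hp : p ≠ []) :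
    repC p r (p ++ x) = r ++ repC p r x := by
  cases p with
  | nil => exact absurd rfl hp
  | cons c p' =>
    rw [List.cons_append, repC_cons_pos (c :: p') r c (p' ++ x)
      (by rw [← List.cons_append]; exact List.prefix_append _ _)]
    simp

lemma prefix_reflect (p r : List Char) (hr : r.head? = some '<') :
    ∀ (s v : List Char), (∀ a ∈ v, a ≠ '<') → v <+: repC p r s → v <+: s := by
  intro s
  induction s with
  | nil =>
    intro v hv h
    rw [repC_nil] at h
    exact h
  | cons c t ih =>
    intro v hv h
    by_cases hpre : p <+: c :: t
    · rw [repC_cons_pos p r c t hpre] at h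
      cases v with
      | nil => exact List.nil_prefix
      | cons a v' =>
        cases r with
        | nil => simp at hr
        | cons b r' =>
          have hb : b = '<' := by simpa using hr
          obtain ⟨z, hz⟩ := h
          rw [List.cons_append, List.cons_append] at hz
          injection hz with h1 _
          exact absurd (h1.trans hb) (hv a List.mem_cons_self)
    · rw [repC_cons_neg p r c t hpre] at h
      cases v with
      | nil => exact List.nil_prefix
      | cons a v' =>
        obtain ⟨z, hz⟩ := h
        rw [List.cons_append] at hz
        injection hz with h1 h2
        have hv' : v' <+: t := ih v' (fun b hb => hv b (List.mem_cons_of_mem a hb)) ⟨z, h2⟩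
        rw [h1]
        exact List.cons_prefix_cons.mpr ⟨rfl, hv'⟩

lemma foldl_stepP_nil (P : List (List Char × List Char)) : P.foldl stepP [] = [] := by
  induction P with
  | nil => rfl
  | cons pr P ih => simp [stepP, repC_nil, ih]

lemma foldl_cons_of_nomatch (P : List (List Char × List Char)) (c : Char)
    (hG : ∀ pr ∈ P, GoodPair pr) :
    ∀ t, (∀ pr ∈ P, ¬ pr.1 <+: c :: t) →
      P.foldl stepP (c :: t) = c :: P.foldl stepP t := by
  induction P with
  | nil => intro t _; rfl
  | cons pr P' ih =>
    intro t h
    have hGp := hG pr List.mem_cons_self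
    have hnpr := h pr List.mem_cons_self
    simp only [List.foldl_cons]
    have hstep : stepP (c :: t) pr = c :: repC pr.1 pr.2 t := by
      unfold stepP
      exact repC_cons_neg pr.1 pr.2 c t hnpr
    rw [hstep]
    apply ih (fun qr hqr => hG qr (List.mem_cons_of_mem pr hqr))
    intro qr hqr hcontra
    have hGq := hG qr (List.mem_cons_of_mem pr hqr)
    obtain ⟨hc, htl⟩ := prefix_head qr.1 c _ hGq.1 hcontra
    have htail : qr.1.tail <+: t := prefix_reflect pr.1 pr.2 hGp.2.1 t qr.1.tail hGq.2.2.1 htl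
    apply h qr (List.mem_cons_of_mem pr hqr)
    cases hq1 : qr.1 with
    | nil => exact List.nil_prefix
    | cons b q' =>
      have hb : b = '<' := by
        have := hGq.1
        rw [hq1] at this
        simpa using this
      rw [hc, hb]
      refine List.cons_prefix_cons.mpr ⟨rfl, ?_⟩
      rw [hq1] at htail
      exact htail

lemma foldl_absorb (P : List (List Char × List Char)) (w : List Char)
    (hw : ∀ a ∈ w.tail, a ≠ '<') (hne : w ≠ [])
    (h : ∀ pr ∈ P, pr.1.head? = some '<' ∧ ¬ pr.1 <+: w ∧ ¬ w <+: pr.1) :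
    ∀ x, P.foldl stepP (w ++ x) = w ++ P.foldl stepP x := by
  induction P with
  | nil => intro x; rfl
  | cons pr P' ih =>
    intro x
    obtain ⟨hh, h1, h2⟩ := h pr List.mem_cons_self
    simp only [List.foldl_cons]
    have : stepP (w ++ x) pr = w ++ stepP x pr := by
      unfold stepP
      exact repC_absorb pr.1 pr.2 w x hw hne hh h1 h2
    rw [this]
    exact ih (fun qr hqr => h qr (List.mem_cons_of_mem pr hqr)) (stepP x pr)

lemma foldl_eq_scanB : ∀ cs : List Char, pairsB.foldl stepP cs = scanB cs := by
  have main : ∀ n : Nat, ∀ cs : List Char, cs.length ≤ n →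
      pairsB.foldl stepP cs = scanB cs := by
    intro n
    induction n with
    | zero =>
      intro cs hcs
      have : cs = [] := List.eq_nil_of_length_eq_zero (Nat.le_zero.mp hcs)
      subst this
      rw [foldl_stepP_nil, scanB]
    | succ n ih =>
      intro cs hcs
      match cs with
      | [] => rw [foldl_stepP_nil, scanB]
      | c :: t =>
        cases hfind : pairsB.find? (fun pr => pr.1.isPrefixOf (c :: t)) with
        | none =>
          have hnm : ∀ pr ∈ pairsB, ¬ pr.1 <+: c :: t := by
            intro pr hpr hcontra
            have := List.find?_eq_none.mp hfind pr hpr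
            simp only [Bool.not_eq_true] at this
            rw [List.isPrefixOf_iff_prefix.mpr hcontra] at this
            exact absurd this (by simp)
          rw [foldl_cons_of_nomatch pairsB c pairsB_good t hnm,
            ih t (by simp at hcs; omega)]
          rw [scanB]
          by_cases hc : c = '<'
          · subst hc
            simp [hfind]
          · simp [hc]
        | some pr =>
          obtain ⟨hp_pred, P₁, P₂, hsplit, hP₁⟩ := List.find?_eq_some_iff_append.mp hfind
          have hpre : pr.1 <+: c :: t := List.isPrefixOf_iff_prefix.mp hp_pred
          have hmem : pr ∈ pairsB := by rw [hsplit]; exact List.mem_append_right _ List.mem_cons_self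
          have hGp := pairsB_good pr hmem
          have hpne : pr.1 ≠ [] := by
            intro h0
            have h1 := hGp.1
            rw [h0] at h1
            simp at h1
          obtain ⟨u, hu⟩ := hpre
          have hc : c = '<' := by
            have := prefix_head pr.1 c t hGp.1 ⟨u, hu⟩
            exact this.1
          subst hc
          -- foldl side
          have hside : pairsB.foldl stepP ('<' :: t) = pr.2 ++ pairsB.foldl stepP u := by
            rw [hsplit, List.foldl_append]
            have hfa1 : P₁.foldl stepP ('<' :: t) = pr.1 ++ P₁.foldl stepP u := by
              rw [← hu]
              apply foldl_absorb P₁ pr.1 hGp.2.2.1 hpne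
              intro qr hqr
              have hqmem : qr ∈ pairsB := by rw [hsplit]; exact List.mem_append_left _ hqr
              have hfq := hP₁ qr hqr
              simp only [Bool.not_eq_eq_eq_not, Bool.not_true,
                isPrefixOf_false_iff] at hfq
              have hq1 : qr.1 ≠ pr.1 := by
                intro he
                exact hfq (he ▸ ⟨u, hu⟩)
              refine ⟨(pairsB_good qr hqmem).1, ?_, ?_⟩
              · exact (pairsB_nopref qr pr hqmem hmem).1 hq1
              · exact (pairsB_nopref pr qr hmem hqmem).1 (fun he => hq1 he.symm)
            rw [hfa1]
            simp only [List.foldl_cons]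
            have hstep : stepP (pr.1 ++ P₁.foldl stepP u) pr
                = pr.2 ++ stepP (P₁.foldl stepP u) pr := by
              unfold stepP
              exact repC_self pr.1 pr.2 _ hpne
            rw [hstep]
            have hrne : pr.2 ≠ [] := by
              intro h0
              have h1 := hGp.2.1
              rw [h0] at h1
              simp at h1
            rw [foldl_absorb P₂ pr.2 hGp.2.2.2 hrne (by
              intro qr hqr
              have hqmem : qr ∈ pairsB := by
                rw [hsplit]
                exact List.mem_append_right _ (List.mem_cons_of_mem pr hqr)
              refine ⟨(pairsB_good qr hqmem).1,
                (pairsB_nopref qr pr hqmem hmem).2.1,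
                (pairsB_nopref qr pr hqmem hmem).2.2⟩) (stepP (P₁.foldl stepP u) pr)]
            congr 1
            rw [List.foldl_append]
            simp only [List.foldl_cons]
          rw [hside]
          -- length bound for IH on u
          have hlen : u.length ≤ n := by
            have : ('<' :: t).length = pr.1.length + u.length := by
              rw [← hu, List.length_append]
            have hp1 : 1 ≤ pr.1.length := by
              cases hq : pr.1
              · exact absurd hq hpne
              · simp
            simp only [List.length_cons] at this hcs
            omega
          rw [ih u hlen]
          -- scanB side
          have hdrop : List.drop (pr.1.length - 1) t = u := by
            cases hq1 : pr.1 with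
            | nil => exact absurd hq1 hpne
            | cons b p' =>
              rw [hq1, List.cons_append] at hu
              injection hu with h1 h2
              simp only [List.length_cons, Nat.add_sub_cancel]
              rw [← h2, List.drop_left]
          rw [scanB]
          simp [hfind, hdrop]
  intro cs
  exact main cs.length cs (Nat.le_refl _)

def trip (p : String × String) : List (List Char × List Char) :=
  [(("<" ++ p.1 ++ ">").toList, ("<" ++ p.2 ++ ">").toList),
   (("<" ++ p.1 ++ " ").toList, ("<" ++ p.2 ++ " ").toList),
   (("</" ++ p.1 ++ ">").toList, ("</" ++ p.2 ++ ">").toList)]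

lemma A_toList (m : List (String × String)) (s : String) :
    (m.foldl (fun c p =>
      let c1 := PySem.Str.replace c ("<" ++ p.1 ++ ">") ("<" ++ p.2 ++ ">")
      let c2 := PySem.Str.replace c1 ("<" ++ p.1 ++ " ") ("<" ++ p.2 ++ " ")
      PySem.Str.replace c2 ("</" ++ p.1 ++ ">") ("</" ++ p.2 ++ ">")) s).toList
    = (m.flatMap trip).foldl (fun c pr => PySem.Chars.replace c pr.1 pr.2) s.toList := by
  induction m generalizing s with
  | nil => rfl
  | cons p m' ih =>
    simp only [List.foldl_cons, List.flatMap_cons, List.foldl_append]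
    rw [ih]
    congr 1
    simp [trip, PySem.Str.toList_replace]

lemma data_eq : seToSldMap.flatMap trip = pairsB := by decide

-- ===== VERDICT (by name: the statement is the Claim_ definition above) =====
theorem rename_se_elements_py_spec : Claim_equal_rename_se_elements_py := by
  intro content _
  unfold Spec_rename_se_elements_py
  apply String.toList_inj.mp
  rw [rename_se_elements_py_alt, String.toList_ofList]
  rw [rename_se_elements_py, A_toList, data_eq]
  rw [PySem.List.foldl_congr_mem pairsB _ stepP content.toList (by
    intro acc pr hpr
    have hg := pairsB_good pr hpr
    have hne : pr.1 ≠ [] := by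
      intro h0
      have h1 := hg.1
      rw [h0] at h1
      simp at h1
    exact replace_eq_repC pr.1 pr.2 acc hne)]
  exact foldl_eq_scanB content.toList
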